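-- pv_equiv track=rewrite | github.com/BrooksLabUCSC/flair | src/flair/flair_variantmodels.py | convert_muts_to_genome_pos
-- ===== SOURCE A (Python) =====
-- def convert_muts_to_genome_pos(mutpos, thisseq):
--     mutinfo = sorted([x[:3] + (int(x[3]) - 1,) + x[4:] for x in mutpos], reverse=True, key=lambda x: x[3])
--     realmutpos = []
--     for thischr, strand, genomepos, pos, muttype, alt in mutinfo:
--         if muttype == 'S':
--             thisseq[pos] = alt
--         elif muttype == 'D':
--             count = int(alt)
--             thisseq = thisseq[:pos] + thisseq[pos + count:]
--             realmutpos = [x[:3] + (x[3] - count,) + x[4:] for x in realmutpos]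
--         elif muttype == 'I':
--             count = len(alt)
--             thisseq = thisseq[:pos] + list(alt) + thisseq[pos:]
--             realmutpos = [x[:3] + (x[3] + count,) + x[4:] for x in realmutpos]
--         realmutpos.append((thischr, strand, genomepos, pos, muttype, alt))
--     realmutpos.sort()
--     return realmutpos
-- ===== SOURCE B (Python) =====
-- def convert_muts_to_genome_pos(mutpos, thisseq):
--     # Return-value equivalent to A; does not perform A's in-place edit of thisseq.
--     ms = sorted(((c, s, g, int(p) - 1, t, a) for c, s, g, p, t, a in mutpos),
--                 key=lambda x: x[3], reverse=True)
--     shifts = [len(a) if t == 'I' else (-int(a) if t == 'D' else 0)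
--               for _, _, _, _, t, a in ms]
--     total = sum(shifts)
--     out = []
--     acc = 0
--     for (c, s, g, p, t, a), sh in zip(ms, shifts):
--         acc += sh
--         out.append((c, s, g, p + (total - acc), t, a))
--     out.sort()
--     return out
-- ===== Notes on version B (the rewrite author's own statement) =====
-- stated objective: alternative
-- what changed: Instead of rescanning and rebuilding the whole collected list after every deletion/insertion (and rebuilding the sequence by slicing), B sorts once and applies each entry's net position shift in a single cumulative-offset pass, never touching the sequence, since the return value does not depend on it.
import Mathlib
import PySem

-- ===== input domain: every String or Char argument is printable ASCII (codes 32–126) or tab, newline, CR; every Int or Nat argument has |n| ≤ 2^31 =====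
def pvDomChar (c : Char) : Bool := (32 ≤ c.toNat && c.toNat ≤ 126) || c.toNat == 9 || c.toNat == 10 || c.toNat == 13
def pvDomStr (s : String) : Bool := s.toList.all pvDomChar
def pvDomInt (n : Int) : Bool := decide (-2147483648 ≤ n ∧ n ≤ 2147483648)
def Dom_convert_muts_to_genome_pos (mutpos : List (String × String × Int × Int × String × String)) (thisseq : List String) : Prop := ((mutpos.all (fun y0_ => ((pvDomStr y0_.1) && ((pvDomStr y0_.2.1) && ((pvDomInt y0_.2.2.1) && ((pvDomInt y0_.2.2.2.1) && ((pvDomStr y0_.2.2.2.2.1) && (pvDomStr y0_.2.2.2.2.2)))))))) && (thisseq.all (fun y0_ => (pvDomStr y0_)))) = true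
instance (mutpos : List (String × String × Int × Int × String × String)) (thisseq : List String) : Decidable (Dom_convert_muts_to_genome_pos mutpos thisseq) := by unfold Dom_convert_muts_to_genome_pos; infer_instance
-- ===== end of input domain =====

-- B replaces A's per-entry rescan of all previously collected entries by one cumulative-offset pass
-- over the sorted list (objective: alternative). A edits its thisseq argument in place (the 'S' branch)
-- before the first 'D'/'I'; B does not touch thisseq — the equivalence proved here is about the
-- RETURN value only.

-- Python's tuple comparison is lexicographic; Mathlib's '<' on products is pointwise, so the final
-- list.sort() is ported with this lexicographic key (injective, hence stability is irrelevant).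
def pvLexKey (x : String × String × Int × Int × String × String) :
    Lex (String × Lex (String × Lex (Int × Lex (Int × Lex (String × String))))) :=
  toLex (x.1, toLex (x.2.1, toLex (x.2.2.1, toLex (x.2.2.2.1, toLex (x.2.2.2.2.1, x.2.2.2.2.2)))))

-- ===== PORT A =====
-- the loop of A: state = (realmutpos, thisseq); one step per entry of mutinfo
def pvAloop : List (String × String × Int × Int × String × String) →
    List (String × String × Int × Int × String × String) × List String →
    List (String × String × Int × Int × String × String) × List String
  | [], st => st
  | (thischr, strand, genomepos, pos, muttype, alt) :: rest, (realmutpos, seq) =>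
    let st' :=
      if muttype == "S" then
        -- thisseq[pos] = alt; Pre_ excludes the IndexError (pySetD total form)
        (realmutpos, PySem.List.pySetD seq pos alt)
      else if muttype == "D" then
        -- count = int(alt); Pre_ excludes the ValueError (getD total form)
        let count := (PySem.Int.ofStr? alt).getD 0
        (realmutpos.map (fun x => (x.1, x.2.1, x.2.2.1, x.2.2.2.1 - count, x.2.2.2.2.1, x.2.2.2.2.2)),
         PySem.List.slice seq none (some pos) ++ PySem.List.slice seq (some (pos + count)) none)
      else if muttype == "I" then
        let count : Int := PySem.Str.len alt
        (realmutpos.map (fun x => (x.1, x.2.1, x.2.2.1, x.2.2.2.1 + count, x.2.2.2.2.1, x.2.2.2.2.2)),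
         PySem.List.slice seq none (some pos) ++ alt.toList.map (fun ch => String.ofList [ch]) ++ PySem.List.slice seq (some pos) none)
      else (realmutpos, seq)
    pvAloop rest (st'.1 ++ [(thischr, strand, genomepos, pos, muttype, alt)], st'.2)

def convert_muts_to_genome_pos (mutpos : List (String × String × Int × Int × String × String)) (thisseq : List String) : List (String × String × Int × Int × String × String) :=
  let mutinfo := PySem.List.sorted
    (mutpos.map (fun x => (x.1, x.2.1, x.2.2.1, x.2.2.2.1 - 1, x.2.2.2.2.1, x.2.2.2.2.2)))
    (fun x => x.2.2.2.1) true
  PySem.List.sorted (pvAloop mutinfo ([], thisseq)).1 pvLexKey false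

-- ===== PORT B =====
-- net genome shift contributed by one entry: +len(alt) for 'I', -int(alt) for 'D', 0 otherwise
def pvShiftOf (x : String × String × Int × Int × String × String) : Int :=
  if x.2.2.2.2.1 == "I" then PySem.Str.len x.2.2.2.2.2
  else if x.2.2.2.2.1 == "D" then -((PySem.Int.ofStr? x.2.2.2.2.2).getD 0)  -- Pre_ excludes the ValueError
  else 0

-- B's single pass: acc = shift of the entries handled so far (incl. the current one);
-- the current entry's final position is p + (total - acc)
def pvBloop : List ((String × String × Int × Int × String × String) × Int) → Int → Int →
    List (String × String × Int × Int × String × String)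
  | [], _, _ => []
  | ((c, s, g, p, t, a), sh) :: rest, total, acc =>
    (c, s, g, p + (total - (acc + sh)), t, a) :: pvBloop rest total (acc + sh)

def convert_muts_to_genome_pos_alt (mutpos : List (String × String × Int × Int × String × String)) (thisseq : List String) : List (String × String × Int × Int × String × String) :=
  let ms := PySem.List.sorted
    (mutpos.map (fun x => (x.1, x.2.1, x.2.2.1, x.2.2.2.1 - 1, x.2.2.2.2.1, x.2.2.2.2.2)))
    (fun x => x.2.2.2.1) true
  let shifts := ms.map pvShiftOf
  PySem.List.sorted (pvBloop (ms.zip shifts) shifts.sum 0) pvLexKey false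

-- ===== PRECONDITION & SPEC =====
-- Pre_ excludes exactly the inputs on which the Python A raises: a ValueError when a 'D' entry's
-- alt is not int-parsable, and an IndexError when an 'S' entry's index is out of range of the
-- sequence at its turn; only the running LENGTH of the sequence is tracked (arithmetically, via
-- Python's slice-length rule) — no output of either program is computed here.
def pvPreLoop : List (String × String × Int × Int × String × String) → Nat → Bool
  | [], _ => true
  | (_, _, _, p, t, a) :: rest, L =>
    if t == "S" then decide (-(L : Int) ≤ p ∧ p < (L : Int)) && pvPreLoop rest L
    else if t == "D" then
      match PySem.Int.ofStr? a with
      | none => false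
      | some k => pvPreLoop rest (PySem.List.clampIdx L p + (L - PySem.List.clampIdx L (p + k)))
    else if t == "I" then pvPreLoop rest (L + a.toList.length)
    else pvPreLoop rest L

def Pre_convert_muts_to_genome_pos (mutpos : List (String × String × Int × Int × String × String)) (thisseq : List String) : Prop :=
  pvPreLoop (PySem.List.sorted
    (mutpos.map (fun x => (x.1, x.2.1, x.2.2.1, x.2.2.2.1 - 1, x.2.2.2.2.1, x.2.2.2.2.2)))
    (fun x => x.2.2.2.1) true) thisseq.length = true
instance (mutpos : List (String × String × Int × Int × String × String)) (thisseq : List String) : Decidable (Pre_convert_muts_to_genome_pos mutpos thisseq) := by unfold Pre_convert_muts_to_genome_pos; infer_instance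

def pvWitness_convert_muts_to_genome_pos : (List (String × String × Int × Int × String × String)) × List String :=
  ([("chr1", "+", 100, 3, "S", "G"), ("chr1", "+", 101, 1, "D", "2")], ["A", "C", "G", "T", "A"])

def Spec_convert_muts_to_genome_pos (mutpos : List (String × String × Int × Int × String × String)) (thisseq : List String) (out : List (String × String × Int × Int × String × String)) : Prop := out = convert_muts_to_genome_pos_alt mutpos thisseq
instance (mutpos : List (String × String × Int × Int × String × String)) (thisseq : List String) (out : List (String × String × Int × Int × String × String)) : Decidable (Spec_convert_muts_to_genome_pos mutpos thisseq out) := by unfold Spec_convert_muts_to_genome_pos; infer_instance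

-- ===== CLAIM (what is proved, stated in full; the proofs are below) =====
def Claim_equal_convert_muts_to_genome_pos : Prop := ∀ (mutpos : List (String × String × Int × Int × String × String)) (thisseq : List String), Dom_convert_muts_to_genome_pos mutpos thisseq → Pre_convert_muts_to_genome_pos mutpos thisseq → Spec_convert_muts_to_genome_pos mutpos thisseq (convert_muts_to_genome_pos mutpos thisseq)

-- ===== LEMMAS AND PROOFS =====
-- add d to the genome-relative position of one collected entry
def pvShiftE (d : Int) (x : String × String × Int × Int × String × String) : String × String × Int × Int × String × String :=
  (x.1, x.2.1, x.2.2.1, x.2.2.2.1 + d, x.2.2.2.2.1, x.2.2.2.2.2)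

theorem pvShiftE_zero : pvShiftE 0 = id := by
  funext x; obtain ⟨a, b, c, d, e, f⟩ := x; simp [pvShiftE]

theorem pvShiftE_comp (d e : Int) : pvShiftE d ∘ pvShiftE e = pvShiftE (e + d) := by
  funext x; obtain ⟨a, b, c, p, t, al⟩ := x; simp [pvShiftE]; ring

-- the invariant of A's loop: the collected list is the already-collected part, shifted by the net
-- shift of the remaining entries, followed by B's pass over the remaining entries
theorem pvAloop_eq_pvBloop (ms : List (String × String × Int × Int × String × String)) :
    ∀ (rmp : List (String × String × Int × Int × String × String)) (seq : List String)
      (total acc : Int), total = acc + (ms.map pvShiftOf).sum →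
    (pvAloop ms (rmp, seq)).1 =
      rmp.map (pvShiftE (total - acc)) ++ pvBloop (ms.zip (ms.map pvShiftOf)) total acc := by
  induction ms with
  | nil =>
    intro rmp seq total acc h
    simp at h
    simp [pvAloop, pvBloop, h, pvShiftE_zero]
  | cons m rest ih =>
    obtain ⟨c, s, g, p, t, a⟩ := m
    intro rmp seq total acc h
    have hsum : total = (acc + pvShiftOf (c, s, g, p, t, a)) + (rest.map pvShiftOf).sum := by
      simp at h; simp [h]; ring
    rw [List.map_cons, List.zip_cons_cons]
    have key : ∀ (seq' : List String),
        (pvAloop rest (rmp.map (pvShiftE (pvShiftOf (c, s, g, p, t, a))) ++ [(c, s, g, p, t, a)], seq')).1 =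
        rmp.map (pvShiftE (total - acc)) ++
          pvBloop (((c, s, g, p, t, a), pvShiftOf (c, s, g, p, t, a)) :: rest.zip (rest.map pvShiftOf)) total acc := by
      intro seq'
      rw [ih _ seq' total (acc + pvShiftOf (c, s, g, p, t, a)) hsum]
      simp only [List.map_append, List.map_map, pvShiftE_comp, pvBloop, List.map_cons, List.map_nil]
      have h1 : pvShiftOf (c, s, g, p, t, a) + (total - (acc + pvShiftOf (c, s, g, p, t, a))) = total - acc := by
        ring
      rw [h1]
      simp [pvShiftE]
    by_cases hS : t == "S"
    · have h0 : pvShiftOf (c, s, g, p, t, a) = 0 := by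
        simp at hS; simp [pvShiftOf, hS]
      rw [show (pvAloop ((c, s, g, p, t, a) :: rest) (rmp, seq)) =
          pvAloop rest (rmp ++ [(c, s, g, p, t, a)], PySem.List.pySetD seq p a) by
        simp [pvAloop, hS]]
      have hthis := key (PySem.List.pySetD seq p a)
      rw [h0] at hthis ⊢
      rw [pvShiftE_zero] at hthis
      simpa using hthis
    · by_cases hD : t == "D"
      · rw [show (pvAloop ((c, s, g, p, t, a) :: rest) (rmp, seq)) =
            pvAloop rest
              (rmp.map (fun x => (x.1, x.2.1, x.2.2.1, x.2.2.2.1 - (PySem.Int.ofStr? a).getD 0, x.2.2.2.2.1, x.2.2.2.2.2)) ++ [(c, s, g, p, t, a)],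
               PySem.List.slice seq none (some p) ++ PySem.List.slice seq (some (p + (PySem.Int.ofStr? a).getD 0)) none) by
          simp [pvAloop, hS, hD]]
        have hsh : pvShiftOf (c, s, g, p, t, a) = -((PySem.Int.ofStr? a).getD 0) := by
          simp at hS hD; simp [pvShiftOf, hD]
        have hmap : rmp.map (fun x => (x.1, x.2.1, x.2.2.1, x.2.2.2.1 - (PySem.Int.ofStr? a).getD 0, x.2.2.2.2.1, x.2.2.2.2.2)) =
            rmp.map (pvShiftE (pvShiftOf (c, s, g, p, t, a))) := by
          simp [hsh, pvShiftE, sub_eq_add_neg]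
        rw [hmap, key]
      · by_cases hI : t == "I"
        · rw [show (pvAloop ((c, s, g, p, t, a) :: rest) (rmp, seq)) =
              pvAloop rest
                (rmp.map (fun x => (x.1, x.2.1, x.2.2.1, x.2.2.2.1 + PySem.Str.len a, x.2.2.2.2.1, x.2.2.2.2.2)) ++ [(c, s, g, p, t, a)],
                 PySem.List.slice seq none (some p) ++ a.toList.map (fun ch => String.ofList [ch]) ++ PySem.List.slice seq (some p) none) by
            simp [pvAloop, hS, hD, hI]]
          have hsh : pvShiftOf (c, s, g, p, t, a) = PySem.Str.len a := by
            simp at hI; simp [pvShiftOf, hI]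
          have hmap : rmp.map (fun x => (x.1, x.2.1, x.2.2.1, x.2.2.2.1 + PySem.Str.len a, x.2.2.2.2.1, x.2.2.2.2.2)) =
              rmp.map (pvShiftE (pvShiftOf (c, s, g, p, t, a))) := by
            simp [hsh, pvShiftE]
          rw [hmap, key]
        · have h0 : pvShiftOf (c, s, g, p, t, a) = 0 := by
            simp at hS hD hI; simp [pvShiftOf, hD, hI]
          rw [show (pvAloop ((c, s, g, p, t, a) :: rest) (rmp, seq)) =
              pvAloop rest (rmp ++ [(c, s, g, p, t, a)], seq) by
            simp [pvAloop, hS, hD, hI]]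
          have hthis := key seq
          rw [h0] at hthis ⊢
          rw [pvShiftE_zero] at hthis
          simpa using hthis

-- ===== VERDICT (by name: the statement is the Claim_ definition above) =====
theorem convert_muts_to_genome_pos_spec : Claim_equal_convert_muts_to_genome_pos := by
  intro mutpos thisseq _ _
  unfold Spec_convert_muts_to_genome_pos convert_muts_to_genome_pos convert_muts_to_genome_pos_alt
  dsimp only
  set ms := PySem.List.sorted
    (mutpos.map (fun x => (x.1, x.2.1, x.2.2.1, x.2.2.2.1 - 1, x.2.2.2.2.1, x.2.2.2.2.2)))
    (fun x => x.2.2.2.1) true with hms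
  rw [pvAloop_eq_pvBloop ms [] thisseq (ms.map pvShiftOf).sum 0 (by simp)]
  simp
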